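-- pv_equiv track=rewrite | github.com/paulfchristiano/py-dwimmer | utilities.py | remove_bracketed
-- ===== SOURCE A (Python) =====
-- def remove_bracketed(s):
--     unbracketed_parts = [""]
--     bracketed_parts = []
--     stack = []
--     parens = {"[":"]", "{":"}", "(":")"}
--     depth = 0
--     openers = "[({"
--     closers = "})]"
--     for c in s:
--         if c in parens.keys():
--             if '[' in stack:
--                 bracketed_parts[-1] += c
--             else:
--                 if c == '[':
--                     bracketed_parts.append("")
--                 else:
--                     unbracketed_parts[-1] += c
--             stack.append(c)
--         elif c in parens.values():
--             if c != parens[stack[-1]]: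
--                 raise ValueError("mismatched parens")
--             stack = stack[:-1]
--             if '[' in stack:
--                 bracketed_parts[-1] += c
--             else:
--                 if c == ']':
--                     unbracketed_parts.append("")
--                 elif c != ']':
--                     unbracketed_parts[-1] += c
--         else:
--             if '[' in stack:
--                 bracketed_parts[-1] += c
--             else:
--                 unbracketed_parts[-1] += c
--     return "{}".join([double_chars(part, "{}") for part in unbracketed_parts]), bracketed_parts
--
-- def double_chars(s, chars):
--     result = []
--     for c in s:
--         result.append(c)
--         if c in chars:
--             result.append(c)
--     return "".join(result)
-- ===== SOURCE B (Python) =====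
-- def remove_bracketed(s):
--     # One pass records the index regions of the top-level [...] groups while
--     # validating bracket matching; both outputs are then slices of s.
--     match = {")": "(", "]": "[", "}": "{"}
--     stack = []
--     regions = []  # (index of a top-level '[', index of its matching ']', or len(s) if unclosed)
--     for i, c in enumerate(s):
--         if c in "([{":
--             if c == '[' and '[' not in stack:
--                 regions.append((i, len(s)))
--             stack.append(c)
--         elif c in ")]}":
--             if match[c] != stack[-1]:
--                 raise ValueError("mismatched parens")
--             stack.pop()
--             if c == ']' and '[' not in stack:
--                 regions[-1] = (regions[-1][0], i)
--     bracketed_parts = [s[start + 1:end] for start, end in regions]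
--     gaps = []
--     pos = 0
--     for start, end in regions:
--         gaps.append(s[pos:start])
--         pos = end + 1
--     if pos <= len(s):
--         gaps.append(s[pos:])
--     joined = "{}".join("".join(c + c if c in "{}" else c for c in gap) for gap in gaps)
--     return joined, bracketed_parts
-- ===== Notes on version B (the rewrite author's own statement) =====
-- stated objective: alternative
-- what changed: A accumulates the unbracketed and bracketed strings mutably inside its single loop; B's loop only records the index regions of the top-level [...] groups (validating brackets at the same characters, so it raises exactly where A does), and both outputs are then reconstructed by slicing the original string at those indices.
import Mathlib
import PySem

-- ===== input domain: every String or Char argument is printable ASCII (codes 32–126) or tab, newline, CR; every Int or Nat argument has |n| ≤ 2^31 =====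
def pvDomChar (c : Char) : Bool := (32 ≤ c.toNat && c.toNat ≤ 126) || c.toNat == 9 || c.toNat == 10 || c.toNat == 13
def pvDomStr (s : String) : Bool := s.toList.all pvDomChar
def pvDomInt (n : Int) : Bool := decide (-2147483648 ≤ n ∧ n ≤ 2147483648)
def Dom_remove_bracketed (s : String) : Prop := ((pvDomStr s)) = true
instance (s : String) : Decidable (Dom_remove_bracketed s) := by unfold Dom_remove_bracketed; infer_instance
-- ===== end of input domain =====

-- A accumulates the part strings mutably inside its loop; B's loop only records the index
-- regions of top-level [...] groups and then slices the original string (objective: alternative).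

-- ===== PORT A =====
-- strings are carried as List Char internally; stacks keep their top at the HEAD
-- (Python appends/pops at the end — same stack discipline, reversed representation).
def pvIsOpen (c : Char) : Bool := c = '[' || c = '(' || c = '{'
def pvIsClose (c : Char) : Bool := c = ']' || c = ')' || c = '}'
def pvMatch (c : Char) : Char := if c = '[' then ']' else if c = '{' then '}' else ')'

-- xs[-1] += c  (Python IndexError on [] is unreachable: see Pre_/the invariants in the proofs)
def pvAppendLast (l : List (List Char)) (c : Char) : List (List Char) :=
  match l with
  | [] => []
  | [x] => [x ++ [c]]
  | x :: xs => x :: pvAppendLast xs c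

-- the body of A's for-loop, state = (unbracketed_parts, bracketed_parts, stack)
def pvStepA (st : List (List Char) × List (List Char) × List Char) (c : Char) :
    List (List Char) × List (List Char) × List Char :=
  let (u, b, stk) := st
  if pvIsOpen c then
    if stk.contains '[' then (u, pvAppendLast b c, c :: stk)
    else if c = '[' then (u, b ++ [[]], c :: stk)
    else (pvAppendLast u c, b, c :: stk)
  else if pvIsClose c then
    match stk with
    | [] => (u, b, [])                      -- Python raises IndexError here (outside Pre_)
    | t :: r =>
      if c ≠ pvMatch t then (u, b, t :: r)  -- Python raises ValueError here (outside Pre_)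
      else if r.contains '[' then (u, pvAppendLast b c, r)
      else if c = ']' then (u ++ [[]], b, r)
      else (pvAppendLast u c, b, r)
  else
    if stk.contains '[' then (u, pvAppendLast b c, stk)
    else (pvAppendLast u c, b, stk)

-- double_chars: result = []; for c: append c; if c in chars: append c; join
def pvDouble (cs chars : List Char) : List Char :=
  cs.foldl (fun r c => r ++ ([c] ++ if chars.contains c then [c] else [])) []

def remove_bracketed (s : String) : String × List String :=
  let fin := s.toList.foldl pvStepA ([[]], [], [])
  (String.mk (List.intercalate ['{', '}'] (fin.1.map (fun p => pvDouble p ['{', '}']))),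
   fin.2.1.map String.mk)

-- ===== PORT B =====
def pvOpenOf (c : Char) : Char := if c = ']' then '[' else if c = '}' then '{' else '('

-- regions[-1] = (regions[-1][0], i)  (Python IndexError on [] is unreachable under Pre_)
def pvSetLast (regs : List (Nat × Nat)) (i : Nat) : List (Nat × Nat) :=
  match regs with
  | [] => []
  | [(a, _)] => [(a, i)]
  | p :: rest => p :: pvSetLast rest i

-- the for-loop over enumerate(s): i is the running index, n = len(s);
-- state = (stack, regions)
def pvScan (cs : List Char) (i n : Nat) (stk : List Char) (regs : List (Nat × Nat)) :
    List Char × List (Nat × Nat) :=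
  match cs with
  | [] => (stk, regs)
  | c :: cs =>
    if pvIsOpen c then
      pvScan cs (i+1) n (c :: stk)
        (if c = '[' && !stk.contains '[' then regs ++ [(i, n)] else regs)
    else if pvIsClose c then
      match stk with
      | [] => pvScan cs (i+1) n [] regs            -- Python: IndexError (outside Pre_)
      | t :: r =>
        if pvOpenOf c ≠ t then pvScan cs (i+1) n (t :: r) regs  -- Python: ValueError (outside Pre_)
        else pvScan cs (i+1) n r (if c = ']' && !r.contains '[' then pvSetLast regs i else regs)
    else pvScan cs (i+1) n stk regs

-- the gaps loop: state = (gaps, pos); s[x:y] is ported as (drop x).take (y-x),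
-- exact here since every slice taken has 0 ≤ x ≤ y ≤ len(s) under Pre_
def pvGapSlices (l : List Char) (regs : List (Nat × Nat)) : List (List Char) × Nat :=
  regs.foldl (fun st p => (st.1 ++ [(l.drop st.2).take (p.1 - st.2)], p.2 + 1)) ([], 0)

def remove_bracketed_alt (s : String) : String × List String :=
  let l := s.toList
  let n := l.length
  let regs := (pvScan l 0 n [] []).2
  let bracketed := regs.map (fun p => (l.drop (p.1 + 1)).take (p.2 - (p.1 + 1)))  -- s[start+1:end]
  let gp := pvGapSlices l regs
  let gaps := if gp.2 ≤ n then gp.1 ++ [l.drop gp.2] else gp.1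
  (String.mk (List.intercalate ['{', '}']
      (gaps.map (fun p => p.flatMap (fun ch => if ch = '{' || ch = '}' then [ch, ch] else [ch])))),
   bracketed.map String.mk)

-- ===== PRECONDITION & SPEC =====
-- Pre_ excludes exactly the inputs on which A raises: a closer on an empty stack
-- (IndexError) or a closer not matching the innermost opener (ValueError).
-- pvValid is the standard matched-brackets shape condition on the input string.
def pvValid : List Char → List Char → Bool
  | [], _ => true
  | c :: cs, stk =>
    if pvIsOpen c then pvValid cs (c :: stk)
    else if pvIsClose c then
      match stk with
      | [] => false
      | t :: r => c = pvMatch t && pvValid cs r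
    else pvValid cs stk

def Pre_remove_bracketed (s : String) : Prop := pvValid s.toList [] = true
instance (s : String) : Decidable (Pre_remove_bracketed s) := by
  unfold Pre_remove_bracketed; infer_instance

def pvWitness_remove_bracketed : String := "a{b}[x(y)]c[d"

def Spec_remove_bracketed (s : String) (out : String × List String) : Prop := out = remove_bracketed_alt s
instance (s : String) (out : String × List String) : Decidable (Spec_remove_bracketed s out) := by unfold Spec_remove_bracketed; infer_instance

-- ===== CLAIM (what is proved, stated in full; the proofs are below) =====
def Claim_equal_remove_bracketed : Prop := ∀ (s : String), Dom_remove_bracketed s → Pre_remove_bracketed s → Spec_remove_bracketed s (remove_bracketed s)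

-- ===== LEMMAS AND PROOFS =====

-- shared stack transition
def pvNextStk (c : Char) (stk : List Char) : List Char :=
  if pvIsOpen c then c :: stk
  else if pvIsClose c then (match stk with | [] => [] | _ :: r => r)
  else stk

-- final stack
def pvFinStk : List Char → List Char → List Char
  | [], stk => stk
  | c :: cs, stk => pvFinStk cs (pvNextStk c stk)

-- xs[0] = c + xs[0]
def pvConsHead (c : Char) (l : List (List Char)) : List (List Char) :=
  match l with
  | [] => [[c]]
  | h :: t => (c :: h) :: t

-- reference step: the parts of the suffix, built back-to-front (proof vehicle only)
def pvStepB (p : Char × Bool × Bool) (st : List (List Char) × List (List Char)) :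
    List (List Char) × List (List Char) :=
  let (c, before, after) := p
  let (u, b) := st
  if pvIsOpen c then
    if before then (u, pvConsHead c b)
    else if c = '[' then (u, b)
    else (pvConsHead c u, b)
  else if pvIsClose c then
    if after then (u, pvConsHead c b)
    else if c = ']' then ([] :: u, [] :: b)
    else (pvConsHead c u, b)
  else
    if before then (u, pvConsHead c b) else (pvConsHead c u, b)

def pvRun : List Char → List Char → List (List Char) × List (List Char)
  | [], stk => ([[]], if stk.contains '[' then [[]] else [])
  | c :: cs, stk =>
    pvStepB (c, stk.contains '[', (pvNextStk c stk).contains '[') (pvRun cs (pvNextStk c stk))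

-- region realizations (proof vehicles)
def pvGapsOf (l : List Char) : Nat → List (Nat × Nat) → List (List Char)
  | pos, [] => if pos ≤ l.length then [l.drop pos] else []
  | pos, (a, b) :: rest => (l.drop pos).take (a - pos) :: pvGapsOf l (b + 1) rest

def pvBrasOf (l : List Char) (regs : List (Nat × Nat)) : List (List Char) :=
  regs.map (fun p => (l.drop (p.1 + 1)).take (p.2 - (p.1 + 1)))

lemma pvConsHead_ne (c : Char) (l : List (List Char)) : pvConsHead c l ≠ [] := by
  cases l <;> simp [pvConsHead]

lemma pvAppendLast_ne (l : List (List Char)) (c : Char) (h : l ≠ []) :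
    pvAppendLast l c ≠ [] := by
  cases l with
  | nil => simp at h
  | cons x xs => cases xs <;> simp [pvAppendLast]

def pvGlue : List (List Char) → List (List Char) → List (List Char)
  | [], v => v
  | [x], v => match v with | [] => [x] | h :: t => (x ++ h) :: t
  | x :: y :: ys, v => x :: pvGlue (y :: ys) v

lemma pvGlue_appendLast (c : Char) (u : List (List Char)) (h : u ≠ []) :
    ∀ v, pvGlue (pvAppendLast u c) v = pvGlue u (pvConsHead c v) := by
  induction u with
  | nil => simp at h
  | cons x xs ih =>
    intro v
    cases xs with
    | nil => cases v <;> simp [pvAppendLast, pvGlue, pvConsHead]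
    | cons y ys =>
      have h2 : pvAppendLast (y :: ys) c ≠ [] := pvAppendLast_ne _ _ (by simp)
      obtain ⟨z, zs, heq⟩ := List.exists_cons_of_ne_nil h2
      have e1 : pvAppendLast (x :: y :: ys) c = x :: pvAppendLast (y :: ys) c := rfl
      rw [e1, heq, show pvGlue (x :: z :: zs) v = x :: pvGlue (z :: zs) v from rfl, ← heq,
        show pvGlue (x :: y :: ys) (pvConsHead c v) = x :: pvGlue (y :: ys) (pvConsHead c v) from rfl,
        ih (by simp) v]

lemma pvGlue_nil_cons (u : List (List Char)) (h : u ≠ []) (v : List (List Char)) :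
    pvGlue u ([] :: v) = u ++ v := by
  induction u with
  | nil => simp at h
  | cons x xs ih =>
    cases xs with
    | nil => simp [pvGlue]
    | cons y ys =>
      rw [show pvGlue (x :: y :: ys) ([] :: v) = x :: pvGlue (y :: ys) ([] :: v) from rfl,
        ih (by simp)]
      rfl

lemma pvGlue_base (u : List (List Char)) (h : u ≠ []) : pvGlue u [[]] = u := by
  have := pvGlue_nil_cons u h []
  simpa using this

lemma pvGlue_snoc_nil (u : List (List Char)) : ∀ v, v ≠ [] → pvGlue (u ++ [[]]) v = u ++ v := by
  induction u with
  | nil =>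
    intro v hv
    obtain ⟨h, t, rfl⟩ := List.exists_cons_of_ne_nil hv
    simp [pvGlue]
  | cons x xs ih =>
    intro v hv
    cases xs with
    | nil => simpa [pvGlue] using ih v hv
    | cons y ys =>
      rw [show ((x :: y :: ys) ++ [[]] : List (List Char)) = x :: ((y :: ys) ++ [[]]) from rfl]
      have h2 : (y :: ys) ++ [[]] ≠ ([] : List (List Char)) := by simp
      obtain ⟨z, zs, heq⟩ := List.exists_cons_of_ne_nil h2
      rw [heq, show pvGlue (x :: z :: zs) v = x :: pvGlue (z :: zs) v from rfl, ← heq, ih v hv]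
      rfl

lemma pvRun_fst_ne (cs : List Char) : ∀ stk, (pvRun cs stk).1 ≠ [] := by
  induction cs with
  | nil => intro stk; simp [pvRun]
  | cons c cs ih =>
    intro stk
    simp only [pvRun, pvStepB]
    split_ifs <;> simp [pvConsHead_ne, ih]

lemma pvMatch_eq_rb (t : Char) (h : pvMatch t = ']') : t = '[' := by
  by_cases h1 : t = '['
  · exact h1
  · by_cases h2 : t = '{' <;> simp [pvMatch, h1, h2] at h

lemma pvRun_snd_ne (cs : List Char) : ∀ stk, pvValid cs stk = true →
    '[' ∈ stk → (pvRun cs stk).2 ≠ [] := by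
  induction cs with
  | nil => intro stk _ h; simp [pvRun, h]
  | cons c cs ih =>
    intro stk hv hm
    by_cases ho : pvIsOpen c
    · simp [pvRun, pvStepB, pvNextStk, ho, hm, pvConsHead_ne]
    · by_cases hcl : pvIsClose c
      · cases stk with
        | nil => simp at hm
        | cons t r =>
          simp [pvValid, ho, hcl] at hv
          by_cases hr : '[' ∈ r
          · simp [pvRun, pvStepB, pvNextStk, ho, hcl, hr, pvConsHead_ne]
          · have ht : t = '[' := by
              rcases List.mem_cons.mp hm with h | h
              · exact h.symm
              · exact absurd h hr
            have hc9 : c = ']' := by rw [hv.1, ht]; rfl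
            subst hc9; subst ht
            simp [pvRun, pvStepB, pvNextStk, pvIsOpen, pvIsClose, hr]
      · simp [pvRun, pvStepB, pvNextStk, ho, hcl, hm, pvConsHead_ne]

lemma pvMain (cs : List Char) : ∀ stk u b, pvValid cs stk = true → u ≠ [] →
    ('[' ∈ stk → b ≠ []) →
    cs.foldl pvStepA (u, b, stk) =
      (pvGlue u (pvRun cs stk).1,
       if '[' ∈ stk then pvGlue b (pvRun cs stk).2 else b ++ (pvRun cs stk).2,
       pvFinStk cs stk) := by
  induction cs with
  | nil =>
    intro stk u b _ hu hb
    by_cases hm : '[' ∈ stk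
    · simp [pvRun, pvFinStk, hm, pvGlue_base u hu, pvGlue_base b (hb hm)]
    · simp [pvRun, pvFinStk, hm, pvGlue_base u hu]
  | cons c cs ih =>
    intro stk u b hv hu hb
    by_cases ho : pvIsOpen c
    · have hv' : pvValid cs (c :: stk) = true := by simpa [pvValid, ho] using hv
      by_cases hm : '[' ∈ stk
      · have hmc : '[' ∈ c :: stk := List.mem_cons_of_mem c hm
        have hstep : pvStepA (u, b, stk) c = (u, pvAppendLast b c, c :: stk) := by
          simp [pvStepA, ho, hm]
        rw [List.foldl_cons, hstep,
          ih (c :: stk) u (pvAppendLast b c) hv' hu (fun _ => pvAppendLast_ne _ _ (hb hm))]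
        simp [pvRun, pvStepB, pvNextStk, pvFinStk, ho, hm, hmc,
          pvGlue_appendLast c b (hb hm)]
      · by_cases h4 : c = '['
        · subst h4
          have hmc : '[' ∈ '[' :: stk := List.mem_cons_self
          have hstep : pvStepA (u, b, stk) '[' = (u, b ++ [[]], '[' :: stk) := by
            simp [pvStepA, ho, hm]
          rw [List.foldl_cons, hstep,
            ih ('[' :: stk) u (b ++ [[]]) hv' hu (fun _ => by simp)]
          have hr2 : (pvRun cs ('[' :: stk)).2 ≠ [] := pvRun_snd_ne cs _ hv' hmc
          simp [pvRun, pvStepB, pvNextStk, pvFinStk, ho, hm, hmc,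
            pvGlue_snoc_nil b _ hr2]
        · have hmc : '[' ∉ c :: stk := by
            simp [List.mem_cons, hm]; exact fun h => h4 h.symm
          have hstep : pvStepA (u, b, stk) c = (pvAppendLast u c, b, c :: stk) := by
            simp [pvStepA, ho, hm, h4]
          rw [List.foldl_cons, hstep,
            ih (c :: stk) (pvAppendLast u c) b hv' (pvAppendLast_ne _ _ hu)
              (fun h => absurd h hmc)]
          simp [pvRun, pvStepB, pvNextStk, pvFinStk, ho, hm, hmc, h4,
            pvGlue_appendLast c u hu]
    · by_cases hcl : pvIsClose c
      · cases stk with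
        | nil => simp [pvValid, ho, hcl] at hv
        | cons t r =>
          simp [pvValid, ho, hcl] at hv
          obtain ⟨hmatch, hv'⟩ := hv
          by_cases hr : '[' ∈ r
          · have hm : '[' ∈ t :: r := List.mem_cons_of_mem t hr
            have hstep : pvStepA (u, b, t :: r) c = (u, pvAppendLast b c, r) := by
              simp [pvStepA, ho, hcl, ← hmatch, hr]
            rw [List.foldl_cons, hstep,
              ih r u (pvAppendLast b c) hv' hu (fun _ => pvAppendLast_ne _ _ (hb hm))]
            simp [pvRun, pvStepB, pvNextStk, pvFinStk, ho, hcl, hr, hm,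
              pvGlue_appendLast c b (hb hm)]
          · by_cases h9 : c = ']'
            · have ht : t = '[' := pvMatch_eq_rb t (by rw [← hmatch, h9])
              subst ht
              have hm : '[' ∈ '[' :: r := List.mem_cons_self
              have hstep : pvStepA (u, b, '[' :: r) c = (u ++ [[]], b, r) := by
                simp [pvStepA, pvIsOpen, pvIsClose, ← hmatch, hr, h9]
              rw [List.foldl_cons, hstep,
                ih r (u ++ [[]]) b hv' (by simp) (fun h => absurd h hr)]
              have hr1 : (pvRun cs r).1 ≠ [] := pvRun_fst_ne cs r
              simp [pvRun, pvStepB, pvNextStk, pvFinStk, pvIsOpen, pvIsClose, hr, hm, h9,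
                pvGlue_snoc_nil u _ hr1, pvGlue_nil_cons u hu, pvGlue_nil_cons b (hb hm)]
            · have ht : t ≠ '[' := fun h => h9 (by rw [hmatch, h]; rfl)
              have hm : '[' ∉ t :: r := by
                simp [List.mem_cons, hr]; exact fun h => ht h.symm
              have hcc : c = ')' ∨ c = '}' := by
                have h := hcl
                simp [pvIsClose] at h
                rcases h with (h | h) | h
                · exact absurd h h9
                · exact Or.inl h
                · exact Or.inr h
              have hstep : pvStepA (u, b, t :: r) c = (pvAppendLast u c, b, r) := by
                rcases hcc with h | h <;>
                  simp [pvStepA, pvIsOpen, pvIsClose, ← hmatch, hr, h]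
              rw [List.foldl_cons, hstep,
                ih r (pvAppendLast u c) b hv' (pvAppendLast_ne _ _ hu)
                  (fun h => absurd h hr)]
              simp [pvRun, pvStepB, pvNextStk, pvFinStk, ho, hcl, hr, hm, h9,
                pvGlue_appendLast c u hu]
      · have hv' : pvValid cs stk = true := by simpa [pvValid, ho, hcl] using hv
        by_cases hm : '[' ∈ stk
        · have hstep : pvStepA (u, b, stk) c = (u, pvAppendLast b c, stk) := by
            simp [pvStepA, ho, hcl, hm]
          rw [List.foldl_cons, hstep,
            ih stk u (pvAppendLast b c) hv' hu (fun _ => pvAppendLast_ne _ _ (hb hm))]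
          simp [pvRun, pvStepB, pvNextStk, pvFinStk, ho, hcl, hm,
            pvGlue_appendLast c b (hb hm)]
        · have hstep : pvStepA (u, b, stk) c = (pvAppendLast u c, b, stk) := by
            simp [pvStepA, ho, hcl, hm]
          rw [List.foldl_cons, hstep,
            ih stk (pvAppendLast u c) b hv' (pvAppendLast_ne _ _ hu)
              (fun h => absurd h hm)]
          simp [pvRun, pvStepB, pvNextStk, pvFinStk, ho, hcl, hm,
            pvGlue_appendLast c u hu]

lemma pvDouble_eq (cs : List Char) :
    pvDouble cs ['{', '}'] =
      cs.flatMap (fun ch => if ch = '{' || ch = '}' then [ch, ch] else [ch]) := by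
  suffices h : ∀ acc, cs.foldl (fun r c => r ++ ([c] ++ if ['{', '}'].contains c then [c] else [])) acc
      = acc ++ cs.flatMap (fun ch => if ch = '{' || ch = '}' then [ch, ch] else [ch]) by
    simpa [pvDouble] using h []
  induction cs with
  | nil => intro acc; simp
  | cons c cs ih =>
    intro acc
    rw [List.foldl_cons, ih, List.flatMap_cons]
    by_cases h1 : c = '{' <;> by_cases h2 : c = '}' <;> simp [h1, h2]

-- ==== new bridge: B's regions realize pvRun ====

lemma pvSetLast_append (q : List (Nat × Nat)) (a m i : Nat) :
    pvSetLast (q ++ [(a, m)]) i = q ++ [(a, i)] := by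
  induction q with
  | nil => rfl
  | cons p q ih =>
    cases q with
    | nil => simp [pvSetLast]
    | cons p2 q2 => simpa [pvSetLast] using ih

lemma pvDropSucc {l : List Char} {i : Nat} {c : Char} {cs : List Char}
    (h : l.drop i = c :: cs) : l.drop (i + 1) = cs := by
  have : l.drop (i + 1) = (l.drop i).drop 1 := by
    rw [List.drop_drop]
  rw [this, h]; rfl

lemma pvDropLt {l : List Char} {i : Nat} {c : Char} {cs : List Char}
    (h : l.drop i = c :: cs) : i < l.length := by
  by_contra hh
  rw [List.drop_eq_nil_of_le (by omega)] at h
  simp at h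

lemma pvTakeDropCons {l : List Char} {i e : Nat} {c : Char} {cs : List Char}
    (h : l.drop i = c :: cs) (he : i < e) :
    (l.drop i).take (e - i) = c :: (l.drop (i + 1)).take (e - (i + 1)) := by
  rw [h, pvDropSucc h]
  have : e - i = (e - (i + 1)) + 1 := by omega
  rw [this, List.take_succ_cons]

lemma pvGapsOf_cons {l : List Char} {i : Nat} {c : Char} {cs : List Char}
    (hd : l.drop i = c :: cs) (R : List (Nat × Nat))
    (hstarts : ∀ p ∈ R, i + 1 ≤ p.1) :
    pvGapsOf l i R = pvConsHead c (pvGapsOf l (i + 1) R) := by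
  have hlt : i < l.length := pvDropLt hd
  cases R with
  | nil =>
    simp only [pvGapsOf]
    rw [if_pos (by omega), if_pos (by omega), hd, pvDropSucc hd]
    rfl
  | cons p rest =>
    obtain ⟨a, b⟩ := p
    have ha : i + 1 ≤ a := hstarts (a, b) (by simp)
    simp only [pvGapsOf]
    rw [pvTakeDropCons hd (by omega)]
    rfl

lemma pvOpenOf_match (t : Char) (h : pvIsOpen t = true) : pvOpenOf (pvMatch t) = t := by
  simp [pvIsOpen] at h
  rcases h with (h | h) | h <;> subst h <;> rfl

lemma pvBridge (l : List Char) (cs : List Char) : ∀ (i : Nat) (stk : List Char),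
    (∀ x ∈ stk, pvIsOpen x = true) →
    pvValid cs stk = true → l.drop i = cs → i + cs.length = l.length →
    ((stk.contains '[' = false →
       ∀ q : List (Nat × Nat), ∃ R,
         (pvScan cs i l.length stk q).2 = q ++ R ∧
         (∀ p ∈ R, i ≤ p.1) ∧
         pvGapsOf l i R = (pvRun cs stk).1 ∧
         pvBrasOf l R = (pvRun cs stk).2) ∧
     (stk.contains '[' = true →
       ∀ (q : List (Nat × Nat)) (a : Nat), ∃ e rest,
         (pvScan cs i l.length stk (q ++ [(a, l.length)])).2 = q ++ (a, e) :: rest ∧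
         i ≤ e ∧ (∀ p ∈ rest, e + 1 ≤ p.1) ∧
         (pvRun cs stk).1 = [] :: pvGapsOf l (e + 1) rest ∧
         (pvRun cs stk).2 = (l.drop i).take (e - i) :: pvBrasOf l rest)) := by
  induction cs with
  | nil =>
    intro i stk _ _ _ hlen
    have hi : i = l.length := by simpa using hlen
    constructor
    · intro hout q
      have hom : '[' ∉ stk := by simpa using hout
      refine ⟨[], by simp [pvScan], by simp, ?_, ?_⟩
      · simp [pvGapsOf, pvRun, hom, hi, List.drop_length]
      · simp [pvBrasOf, pvRun, hom]
    · intro hin q a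
      have him : '[' ∈ stk := by simpa using hin
      refine ⟨l.length, [], by simp [pvScan], by omega, by simp, ?_, ?_⟩
      · have h1 : ¬ (l.length + 1 ≤ l.length) := by omega
        simp [pvRun, him, pvGapsOf, h1]
      · simp [pvRun, him, pvBrasOf, hi, List.drop_length]
  | cons c cs ih =>
    intro i stk hstk hv hd hlen
    have hd' : l.drop (i + 1) = cs := pvDropSucc hd
    have hlen' : i + 1 + cs.length = l.length := by
      simp only [List.length_cons] at hlen; omega
    by_cases ho : pvIsOpen c = true
    · -- opener
      have hv' : pvValid cs (c :: stk) = true := by simpa [pvValid, ho] using hv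
      have hstk' : ∀ x ∈ c :: stk, pvIsOpen x = true := by
        intro x hx
        rcases List.mem_cons.mp hx with h | h
        · subst h; exact ho
        · exact hstk x h
      constructor
      · -- outside mode
        intro hout q
        have hom : '[' ∉ stk := by simpa using hout
        by_cases hc : c = '['
        · subst hc
          have hin' : (('[' :: stk).contains '[') = true := by simp
          obtain ⟨e, rest, hres, hie, hrest, hg, hb⟩ :=
            (ih (i + 1) ('[' :: stk) hstk' hv' hd' hlen').2 hin' q i
          have hscan : pvScan ('[' :: cs) i l.length stk q
              = pvScan cs (i + 1) l.length ('[' :: stk) (q ++ [(i, l.length)]) := by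
            simp [pvScan, ho, hom]
          have hrun : pvRun ('[' :: cs) stk = pvRun cs ('[' :: stk) := by
            simp [pvRun, pvStepB, pvNextStk, ho, hom]
          refine ⟨(i, e) :: rest, ?_, ?_, ?_, ?_⟩
          · rw [hscan]; exact hres
          · intro p hp
            rcases List.mem_cons.mp hp with h | h
            · subst h; exact le_refl _
            · have := hrest p h; omega
          · rw [hrun, hg]; simp [pvGapsOf]
          · rw [hrun, hb]; simp [pvBrasOf]
        · have hom' : '[' ∉ c :: stk := by
            intro h
            rcases List.mem_cons.mp h with h | h
            · exact hc h.symm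
            · exact hom h
          have hout' : ((c :: stk).contains '[') = false := by simpa using hom'
          obtain ⟨R, hres, hstarts, hg, hb⟩ :=
            (ih (i + 1) (c :: stk) hstk' hv' hd' hlen').1 hout' q
          have hscan : pvScan (c :: cs) i l.length stk q
              = pvScan cs (i + 1) l.length (c :: stk) q := by
            simp [pvScan, ho, hc]
          have hrun : pvRun (c :: cs) stk
              = (pvConsHead c (pvRun cs (c :: stk)).1, (pvRun cs (c :: stk)).2) := by
            simp [pvRun, pvStepB, pvNextStk, ho, hom, hc]
          refine ⟨R, ?_, ?_, ?_, ?_⟩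
          · rw [hscan]; exact hres
          · intro p hp; have := hstarts p hp; omega
          · rw [hrun, pvGapsOf_cons hd R hstarts, hg]
          · rw [hrun]; exact hb
      · -- inside mode
        intro hin q a
        have him : '[' ∈ stk := by simpa using hin
        have him' : '[' ∈ c :: stk := List.mem_cons_of_mem c him
        have hin' : ((c :: stk).contains '[') = true := by simpa using him'
        obtain ⟨e, rest, hres, hie, hrest, hg, hb⟩ :=
          (ih (i + 1) (c :: stk) hstk' hv' hd' hlen').2 hin' q a
        have hscan : pvScan (c :: cs) i l.length stk (q ++ [(a, l.length)])
            = pvScan cs (i + 1) l.length (c :: stk) (q ++ [(a, l.length)]) := by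
          simp [pvScan, ho, him]
        have hrun : pvRun (c :: cs) stk
            = ((pvRun cs (c :: stk)).1, pvConsHead c (pvRun cs (c :: stk)).2) := by
          simp [pvRun, pvStepB, pvNextStk, ho, him]
        refine ⟨e, rest, ?_, by omega, hrest, ?_, ?_⟩
        · rw [hscan]; exact hres
        · rw [hrun]; exact hg
        · rw [hrun, hb, pvTakeDropCons hd (by omega)]; rfl
    · by_cases hcl : pvIsClose c = true
      · -- closer
        cases stk with
        | nil => simp [pvValid, ho, hcl] at hv
        | cons t r =>
          have hto : pvIsOpen t = true := hstk t (by simp)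
          have hv2 : c = pvMatch t ∧ pvValid cs r = true := by
            simpa [pvValid, ho, hcl] using hv
          obtain ⟨hmatch, hv'⟩ := hv2
          have hopen : pvOpenOf c = t := by rw [hmatch]; exact pvOpenOf_match t hto
          have hstk' : ∀ x ∈ r, pvIsOpen x = true :=
            fun x hx => hstk x (List.mem_cons_of_mem t hx)
          constructor
          · -- outside mode
            intro hout q
            have hom : '[' ∉ t :: r := by simpa using hout
            have hnt : t ≠ '[' := fun h => hom (by rw [h]; exact List.mem_cons_self)
            have hrm : '[' ∉ r := fun h => hom (List.mem_cons_of_mem t h)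
            have hr : r.contains '[' = false := by simpa using hrm
            have hc9 : c ≠ ']' := by
              rw [hmatch]
              simp [pvIsOpen] at hto
              rcases hto with (h | h) | h <;> subst h
              · exact absurd rfl hnt
              · simp [pvMatch]
              · simp [pvMatch]
            obtain ⟨R, hres, hstarts, hg, hb⟩ :=
              (ih (i + 1) r hstk' hv' hd' hlen').1 hr q
            have hscan : pvScan (c :: cs) i l.length (t :: r) q
                = pvScan cs (i + 1) l.length r q := by
              simp [pvScan, ho, hcl, hopen, hc9]
            have hrun : pvRun (c :: cs) (t :: r)
                = (pvConsHead c (pvRun cs r).1, (pvRun cs r).2) := by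
              simp [pvRun, pvStepB, pvNextStk, ho, hcl, hrm, hc9]
            refine ⟨R, ?_, ?_, ?_, ?_⟩
            · rw [hscan]; exact hres
            · intro p hp; have := hstarts p hp; omega
            · rw [hrun, pvGapsOf_cons hd R hstarts, hg]
            · rw [hrun]; exact hb
          · -- inside mode
            intro hin q a
            by_cases hrm : '[' ∈ r
            · -- the region stays open
              have hr : r.contains '[' = true := by simpa using hrm
              obtain ⟨e, rest, hres, hie, hrest, hg, hb⟩ :=
                (ih (i + 1) r hstk' hv' hd' hlen').2 hr q a
              have hscan : pvScan (c :: cs) i l.length (t :: r) (q ++ [(a, l.length)])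
                  = pvScan cs (i + 1) l.length r (q ++ [(a, l.length)]) := by
                simp [pvScan, ho, hcl, hopen, hrm]
              have hrun : pvRun (c :: cs) (t :: r)
                  = ((pvRun cs r).1, pvConsHead c (pvRun cs r).2) := by
                simp [pvRun, pvStepB, pvNextStk, ho, hcl, hrm]
              refine ⟨e, rest, ?_, by omega, hrest, ?_, ?_⟩
              · rw [hscan]; exact hres
              · rw [hrun]; exact hg
              · rw [hrun, hb, pvTakeDropCons hd (by omega)]; rfl
            · -- the region closes here
              have hr' : r.contains '[' = false := by simpa using hrm
              have him : '[' ∈ t :: r := by simpa using hin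
              have hnt : t = '[' := by
                rcases List.mem_cons.mp him with h | h
                · exact h.symm
                · exact absurd h hrm
              subst hnt
              have hc9 : c = ']' := by rw [hmatch]; rfl
              subst hc9
              obtain ⟨R, hres, hstarts, hg, hb⟩ :=
                (ih (i + 1) r hstk' hv' hd' hlen').1 hr' (q ++ [(a, i)])
              have hscan : pvScan (']' :: cs) i l.length ('[' :: r) (q ++ [(a, l.length)])
                  = pvScan cs (i + 1) l.length r (q ++ [(a, i)]) := by
                simp [pvScan, pvIsOpen, pvIsClose, pvOpenOf, hrm, pvSetLast_append]
              have hrun : pvRun (']' :: cs) ('[' :: r)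
                  = ([] :: (pvRun cs r).1, [] :: (pvRun cs r).2) := by
                simp [pvRun, pvStepB, pvNextStk, pvIsOpen, pvIsClose, hrm]
              refine ⟨i, R, ?_, le_refl _, ?_, ?_, ?_⟩
              · rw [hscan, hres, List.append_assoc]; rfl
              · intro p hp; exact hstarts p hp
              · rw [hrun, ← hg]
              · rw [hrun, ← hb]; simp
      · -- ordinary character
        have hv' : pvValid cs stk = true := by simpa [pvValid, ho, hcl] using hv
        constructor
        · intro hout q
          have hom : '[' ∉ stk := by simpa using hout
          obtain ⟨R, hres, hstarts, hg, hb⟩ :=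
            (ih (i + 1) stk hstk hv' hd' hlen').1 hout q
          have hscan : pvScan (c :: cs) i l.length stk q
              = pvScan cs (i + 1) l.length stk q := by
            simp [pvScan, ho, hcl]
          have hrun : pvRun (c :: cs) stk
              = (pvConsHead c (pvRun cs stk).1, (pvRun cs stk).2) := by
            simp [pvRun, pvStepB, pvNextStk, ho, hcl, hom]
          refine ⟨R, ?_, ?_, ?_, ?_⟩
          · rw [hscan]; exact hres
          · intro p hp; have := hstarts p hp; omega
          · rw [hrun, pvGapsOf_cons hd R hstarts, hg]
          · rw [hrun]; exact hb
        · intro hin q a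
          have him : '[' ∈ stk := by simpa using hin
          obtain ⟨e, rest, hres, hie, hrest, hg, hb⟩ :=
            (ih (i + 1) stk hstk hv' hd' hlen').2 hin q a
          have hscan : pvScan (c :: cs) i l.length stk (q ++ [(a, l.length)])
              = pvScan cs (i + 1) l.length stk (q ++ [(a, l.length)]) := by
            simp [pvScan, ho, hcl]
          have hrun : pvRun (c :: cs) stk
              = ((pvRun cs stk).1, pvConsHead c (pvRun cs stk).2) := by
            simp [pvRun, pvStepB, pvNextStk, ho, hcl, him]
          refine ⟨e, rest, ?_, by omega, hrest, ?_, ?_⟩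
          · rw [hscan]; exact hres
          · rw [hrun]; exact hg
          · rw [hrun, hb, pvTakeDropCons hd (by omega)]; rfl

lemma pvGapsAux (l : List Char) (regs : List (Nat × Nat)) : ∀ (g : List (List Char)) (pos : Nat),
    (if (regs.foldl (fun st p => (st.1 ++ [(l.drop st.2).take (p.1 - st.2)], p.2 + 1)) (g, pos)).2 ≤ l.length
     then (regs.foldl (fun st p => (st.1 ++ [(l.drop st.2).take (p.1 - st.2)], p.2 + 1)) (g, pos)).1
          ++ [l.drop (regs.foldl (fun st p => (st.1 ++ [(l.drop st.2).take (p.1 - st.2)], p.2 + 1)) (g, pos)).2]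
     else (regs.foldl (fun st p => (st.1 ++ [(l.drop st.2).take (p.1 - st.2)], p.2 + 1)) (g, pos)).1)
    = g ++ pvGapsOf l pos regs := by
  induction regs with
  | nil =>
    intro g pos
    simp only [List.foldl_nil, pvGapsOf]
    split_ifs <;> simp
  | cons p regs ih =>
    intro g pos
    obtain ⟨a, b⟩ := p
    rw [List.foldl_cons]
    have := ih (g ++ [(l.drop pos).take (a - pos)]) (b + 1)
    rw [this]
    simp [pvGapsOf]

-- ===== VERDICT (by name: the statement is the Claim_ definition above) =====
theorem remove_bracketed_spec : Claim_equal_remove_bracketed := by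
  intro s _ hpre
  have hmain := pvMain s.toList [] [[]] [] hpre (by simp) (by simp)
  have hfst : pvGlue [[]] (pvRun s.toList []).1 = (pvRun s.toList []).1 := by
    simpa using pvGlue_snoc_nil [] _ (pvRun_fst_ne s.toList [])
  obtain ⟨R, hres, _, hg, hb⟩ :=
    (pvBridge s.toList s.toList 0 [] (by simp) hpre (by simp) (by simp)).1 rfl []
  have hgaps := pvGapsAux s.toList R [] 0
  unfold Spec_remove_bracketed remove_bracketed remove_bracketed_alt
  simp only [hmain, hres, List.nil_append, pvGapSlices]
  rw [hgaps, ← hb]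
  simp [hfst, hg, pvDouble_eq, pvBrasOf, List.map_map]
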